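-- pv_equiv track=rewrite | github.com/mikyungmon/CodingTest | 프로그래머스/1/1845. 폰켓몬/폰켓몬.py | solution
-- ===== SOURCE A (Python) =====
-- def solution(nums):
--     choose_num = len(nums)//2
--     a = []
--     for i in nums:
--         if i not in a:
--             a.append(i)
--     exist_num = len(a)
--
--     if(choose_num > exist_num):
--         return exist_num
--     elif (choose_num == exist_num) :
--         return choose_num
--     elif (choose_num < exist_num):
--         return choose_num
-- ===== SOURCE B (Python) =====
-- def solution(nums):
--     exist = 0
--     prev = None
--     for x in sorted(nums):
--         if prev is None or x != prev:
--             exist += 1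
--         prev = x
--     return min(len(nums) // 2, exist)
-- ===== Notes on version B (the rewrite author's own statement) =====
-- stated objective: faster
-- what changed: Replaces A's quadratic build of a first-occurrence list via repeated linear membership tests with a sort followed by a single adjacent-difference scan counting distinct values, and replaces the three-way comparison chain with min.
import Mathlib
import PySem

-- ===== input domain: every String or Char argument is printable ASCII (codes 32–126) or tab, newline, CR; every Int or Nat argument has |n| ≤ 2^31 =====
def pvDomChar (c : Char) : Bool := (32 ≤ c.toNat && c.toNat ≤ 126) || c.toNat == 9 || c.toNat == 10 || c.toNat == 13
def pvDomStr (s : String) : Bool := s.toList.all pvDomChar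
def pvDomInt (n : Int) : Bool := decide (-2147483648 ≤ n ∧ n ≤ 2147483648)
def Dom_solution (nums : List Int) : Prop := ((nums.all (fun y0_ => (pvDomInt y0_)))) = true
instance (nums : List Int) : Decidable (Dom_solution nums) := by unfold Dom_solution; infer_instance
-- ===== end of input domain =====

-- B replaces A's quadratic first-occurrence list (linear membership test per element)
-- with a sort plus one adjacent-difference scan, and the comparison chain with min.


-- ===== PORT A =====
def solution (nums : List Int) : Int :=
  let choose_num : Int := PySem.Int.floordiv (nums.length : Int) 2
  let a : List Int := nums.foldl (fun a i => if i ∈ a then a else a ++ [i]) []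
  let exist_num : Int := a.length
  if choose_num > exist_num then exist_num
  else if choose_num = exist_num then choose_num
  else choose_num  -- the last `elif choose_num < exist_num` is exhaustive here by trichotomy

-- ===== PORT B =====
-- loop body: `if prev is None or x != prev: exist += 1` then `prev = x`
def bstep (st : Int × Option Int) (x : Int) : Int × Option Int :=
  ((match st.2 with
    | none => st.1 + 1
    | some p => if x ≠ p then st.1 + 1 else st.1), some x)

def solution_alt (nums : List Int) : Int :=
  let s := PySem.List.sorted nums (fun x => x) false
  let r := s.foldl bstep (0, none)
  min (PySem.Int.floordiv (nums.length : Int) 2) r.1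

-- ===== PRECONDITION & SPEC =====
def Spec_solution (nums : List Int) (out : Int) : Prop := out = solution_alt nums
instance (nums : List Int) (out : Int) : Decidable (Spec_solution nums out) := by unfold Spec_solution; infer_instance

-- ===== CLAIM (what is proved, stated in full; the proofs are below) =====
def Claim_equal_solution : Prop := ∀ (nums : List Int), Dom_solution nums → Spec_solution nums (solution nums)

-- ===== LEMMAS AND PROOFS =====

-- A's accumulator: elements are those of acc and the processed prefix
theorem astep_toFinset (l : List Int) : ∀ (acc : List Int),
    (l.foldl (fun a i => if i ∈ a then a else a ++ [i]) acc).toFinset = acc.toFinset ∪ l.toFinset := by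
  induction l with
  | nil => intro acc; simp
  | cons x xs ih =>
    intro acc
    simp only [List.foldl_cons]
    by_cases h : x ∈ acc
    · simp only [if_pos h, ih]
      ext y
      simp only [Finset.mem_union, List.mem_toFinset, List.mem_cons]
      constructor
      · tauto
      · rintro (hy | rfl | hy) <;> tauto
    · simp only [if_neg h, ih]
      ext y
      simp only [Finset.mem_union, List.mem_toFinset, List.mem_append, List.mem_cons,
        List.not_mem_nil]
      tauto

theorem astep_nodup (l : List Int) : ∀ (acc : List Int), acc.Nodup →
    (l.foldl (fun a i => if i ∈ a then a else a ++ [i]) acc).Nodup := by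
  induction l with
  | nil => intro acc h; simpa using h
  | cons x xs ih =>
    intro acc h
    simp only [List.foldl_cons]
    by_cases hx : x ∈ acc
    · simpa [if_pos hx] using ih acc h
    · refine ih _ ?_
      simp only [if_neg hx]
      exact List.Nodup.append h (List.nodup_singleton x) (by simpa using hx)

theorem a_count (nums : List Int) :
    (nums.foldl (fun a i => if i ∈ a then a else a ++ [i]) []).length = nums.toFinset.card := by
  have hnd := astep_nodup nums [] List.nodup_nil
  have hfin := astep_toFinset nums []
  have := List.toFinset_card_of_nodup hnd
  rw [hfin] at this
  simpa using this.symm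

-- B's scan over a sorted tail: state (e, some p), p below everything in s
theorem b_count_aux (s : List Int) : ∀ (p e : Int), (p :: s).Pairwise (· ≤ ·) →
    (s.foldl bstep (e, some p)).1 = e + ((p :: s).toFinset.card : Int) - 1 := by
  induction s with
  | nil => intro p e _; simp
  | cons x xs ih =>
    intro p e hpw
    have hpx : p ≤ x := (List.pairwise_cons.mp hpw).1 x (by simp)
    have htail : (x :: xs).Pairwise (· ≤ ·) := (List.pairwise_cons.mp hpw).2
    simp only [List.foldl_cons]
    by_cases hxp : x = p
    · have hb : bstep (e, some p) x = (e, some x) := by simp [bstep, hxp]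
      rw [hb, ih x e htail]
      have : (p :: x :: xs).toFinset = (x :: xs).toFinset := by
        subst hxp; simp
      rw [this]
    · have hb : bstep (e, some p) x = (e + 1, some x) := by simp [bstep, hxp]
      rw [hb, ih x (e + 1) htail]
      have hplt : p < x := lt_of_le_of_ne hpx (fun h => hxp h.symm)
      have hpnot : p ∉ (x :: xs).toFinset := by
        simp only [List.mem_toFinset, List.mem_cons]
        rintro (rfl | hmem)
        · exact absurd rfl (ne_of_lt hplt)
        · have : x ≤ p := (List.pairwise_cons.mp htail).1 p hmem
          exact absurd this (not_le_of_gt hplt)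
      have hcard : (p :: x :: xs).toFinset.card = (x :: xs).toFinset.card + 1 := by
        simp only [List.toFinset_cons]
        rw [Finset.card_insert_of_notMem (by simpa using hpnot)]
      simp only [hcard]
      push_cast
      ring

theorem b_count (s : List Int) (hs : s.Pairwise (· ≤ ·)) :
    (s.foldl bstep (0, none)).1 = (s.toFinset.card : Int) := by
  cases s with
  | nil => simp
  | cons x xs =>
    have htail : (x :: xs).Pairwise (· ≤ ·) := hs
    have hb : bstep ((0 : Int), (none : Option Int)) x = (1, some x) := by simp [bstep]
    simp only [List.foldl_cons, hb]
    rw [b_count_aux xs x 1 htail]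
    ring

-- ===== VERDICT (by name: the statement is the Claim_ definition above) =====
theorem solution_spec : Claim_equal_solution := by
  intro nums _
  unfold Spec_solution solution solution_alt
  have hperm : (PySem.List.sorted nums (fun x => x) false).Perm nums :=
    PySem.List.sorted_perm ..
  have hpw : (PySem.List.sorted nums (fun x => x) false).Pairwise (· ≤ ·) := by
    simpa using PySem.List.sorted_pairwise (xs := nums) (key := fun x => x)
  have hB := b_count _ hpw
  rw [List.toFinset_eq_of_perm _ _ hperm] at hB
  have hA := a_count nums
  dsimp only
  rw [hB, hA]
  set c : Int := PySem.Int.floordiv (nums.length : Int) 2 with hc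
  set k : Int := (nums.toFinset.card : Int) with hk
  simp only [min_def, gt_iff_lt]
  split_ifs <;> omega
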